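-- pv_equiv track=rewrite | github.com/ambrollins619/Othello-AI-Agent | utils.py | find_stable_disks
-- ===== SOURCE A (Python) =====
-- def find_stable_disks(board, player):
--     """
--     Find the number of stable disks for a given player.
--
--     Stable disks are those that cannot be flipped for the rest of the game.
--     A disk is considered stable if it is surrounded by friendly disks or locked in corners/edges.
--
--     Args:
--         board (list of lists): 2D Othello board.
--         player (int): The player (1 or -1).
--
--     Returns:
--         int: Count of stable disks.
--     """
--     stable_count = 0
--     rows, cols = len(board), len(board[0])
--     directions = [(-1, -1), (-1, 0), (-1, 1), (0, -1), (0, 1), (1, -1), (1, 0), (1, 1)]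
--
--     for r in range(rows):
--         for c in range(cols):
--             if board[r][c] == player:
--                 # A disk is stable if all directions are blocked or occupied by the player
--                 stable = True
--                 for dr, dc in directions:
--                     nr, nc = r + dr, c + dc
--                     if 0 <= nr < rows and 0 <= nc < cols and board[nr][nc] == 0:
--                         stable = False
--                         break
--                 if stable:
--                     stable_count += 1
--
--     return stable_count
-- ===== SOURCE B (Python) =====
-- def find_stable_disks(board, player):
--     """Count player's disks with no empty in-bounds neighbor, by propagating
--     'unstable' marks outward from empty cells instead of scanning each disk's
--     neighborhood."""
--     rows, cols = len(board), len(board[0])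
--     directions = [(-1, -1), (-1, 0), (-1, 1), (0, -1), (0, 1), (1, -1), (1, 0), (1, 1)]
--     empties = [(r, c) for r in range(rows) for c in range(cols) if board[r][c] == 0]
--     unstable = set()
--     for r, c in empties:
--         for dr, dc in directions:
--             nr, nc = r + dr, c + dc
--             if 0 <= nr < rows and 0 <= nc < cols:
--                 unstable.add((nr, nc))
--     return sum(1 for r in range(rows) for c in range(cols)
--                if board[r][c] == player and (r, c) not in unstable)
-- ===== Notes on version B (the rewrite author's own statement) =====
-- stated objective: alternative
-- what changed: Instead of testing the 8-neighborhood of every player disk (with an inner break loop), B scans once for empty cells, marks all their in-bounds neighbors in an 'unstable' set, and counts player cells absent from that set.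
import Mathlib
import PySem

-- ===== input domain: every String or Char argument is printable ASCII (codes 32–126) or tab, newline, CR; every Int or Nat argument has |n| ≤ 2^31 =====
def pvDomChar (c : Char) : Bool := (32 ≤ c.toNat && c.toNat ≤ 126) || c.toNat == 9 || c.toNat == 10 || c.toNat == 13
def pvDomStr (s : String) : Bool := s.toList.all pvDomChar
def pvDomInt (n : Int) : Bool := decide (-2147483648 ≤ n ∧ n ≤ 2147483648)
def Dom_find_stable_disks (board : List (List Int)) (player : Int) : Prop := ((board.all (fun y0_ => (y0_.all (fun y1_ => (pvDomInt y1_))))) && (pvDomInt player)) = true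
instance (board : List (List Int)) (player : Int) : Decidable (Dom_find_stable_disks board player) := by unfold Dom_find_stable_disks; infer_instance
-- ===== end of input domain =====

-- B replaces A's per-disk 8-neighborhood scan by one pass collecting empty cells,
-- marking their in-bounds neighbors in an 'unstable' set, and counting player cells
-- outside that set (objective: alternative traversal, same exact count).

-- shared small helpers (board cell read, the 8 directions, the bounds test)
def pvDirs : List (Int × Int) := [(-1,-1),(-1,0),(-1,1),(0,-1),(0,1),(1,-1),(1,0),(1,1)]

def pvAt (board : List (List Int)) (r c : Int) : Int :=
  PySem.List.pyGetD (PySem.List.pyGetD board r []) c 0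

def pvInb (rows cols r c : Int) : Bool :=
  decide (0 ≤ r) && decide (r < rows) && decide (0 ≤ c) && decide (c < cols)

-- ===== PORT A =====
def find_stable_disks (board : List (List Int)) (player : Int) : Int :=
  let rows : Int := board.length
  let cols : Int := (PySem.List.pyGetD board 0 []).length
  (PySem.List.pyRange 0 rows 1).foldl (fun acc r =>
    (PySem.List.pyRange 0 cols 1).foldl (fun acc c =>
      if pvAt board r c == player then
        -- inner 'for dr, dc ... break' loop: stable ↔ no direction hits an in-bounds empty cell
        let stable := pvDirs.all (fun d =>
          !(pvInb rows cols (r + d.1) (c + d.2) && (pvAt board (r + d.1) (c + d.2) == 0)))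
        if stable then acc + 1 else acc
      else acc) acc) 0

-- ===== PORT B =====
def find_stable_disks_alt (board : List (List Int)) (player : Int) : Int :=
  let rows : Int := board.length
  let cols : Int := (PySem.List.pyGetD board 0 []).length
  let empties : List (Int × Int) :=
    (PySem.List.pyRange 0 rows 1).flatMap (fun r =>
      ((PySem.List.pyRange 0 cols 1).filter (fun c => pvAt board r c == 0)).map (fun c => (r, c)))
  let unstable : PySem.Set (Int × Int) :=
    empties.foldl (fun s rc =>
      pvDirs.foldl (fun s d =>
        if pvInb rows cols (rc.1 + d.1) (rc.2 + d.2)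
        then PySem.Set.add s (rc.1 + d.1, rc.2 + d.2) else s) s) PySem.Set.empty
  (((PySem.List.pyRange 0 rows 1).flatMap (fun r =>
      (PySem.List.pyRange 0 cols 1).map (fun c => (r, c)))).countP (fun rc =>
        pvAt board rc.1 rc.2 == player && !(PySem.Set.contains unstable rc)) : Int)

-- ===== PRECONDITION & SPEC =====
-- Python A raises IndexError on board == [] (board[0]) and whenever some row is
-- shorter than len(board[0]) (board[r][c] with c < cols is reached for every cell):
-- exactly those inputs are excluded.
def Pre_find_stable_disks (board : List (List Int)) (player : Int) : Prop :=
  board ≠ [] ∧ ∀ row ∈ board, (PySem.List.pyGetD board 0 []).length ≤ row.length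
instance (board : List (List Int)) (player : Int) : Decidable (Pre_find_stable_disks board player) := by unfold Pre_find_stable_disks; infer_instance

def pvWitness_find_stable_disks : List (List Int) × Int := ([[1, 0], [1, -1]], 1)

def Spec_find_stable_disks (board : List (List Int)) (player : Int) (out : Int) : Prop := out = find_stable_disks_alt board player
instance (board : List (List Int)) (player : Int) (out : Int) : Decidable (Spec_find_stable_disks board player out) := by unfold Spec_find_stable_disks; infer_instance

-- ===== CLAIM (what is proved, stated in full; the proofs are below) =====
def Claim_equal_find_stable_disks : Prop := ∀ (board : List (List Int)) (player : Int), Dom_find_stable_disks board player → Pre_find_stable_disks board player → Spec_find_stable_disks board player (find_stable_disks board player)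

-- ===== LEMMAS AND PROOFS =====

-- membership in a fold that conditionally adds f d to a PySem.Set
theorem pv_mem_addfold {β : Type} (l : List β) (s : PySem.Set (Int × Int))
    (p : β → Bool) (f : β → Int × Int) (x : Int × Int) :
    (x ∈ l.foldl (fun s d => if p d then PySem.Set.add s (f d) else s) s) ↔
      x ∈ s ∨ ∃ d ∈ l, p d = true ∧ x = f d := by
  induction l generalizing s with
  | nil => simp
  | cons h t ih =>
    simp only [List.foldl_cons, ih]
    by_cases hp : p h = true
    · simp only [if_pos hp, PySem.Set.mem_add]
      constructor
      · rintro (⟨hs | hx⟩ | ⟨d, hd, hpd, hxd⟩)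
        · exact Or.inl hs
        · exact Or.inr ⟨h, by simp, hp, hx⟩
        · exact Or.inr ⟨d, by simp [hd], hpd, hxd⟩
      · rintro (hs | ⟨d, hd, hpd, hxd⟩)
        · exact Or.inl (Or.inl hs)
        · rcases List.mem_cons.mp hd with h1 | h1
          · subst h1; exact Or.inl (Or.inr hxd)
          · exact Or.inr ⟨d, h1, hpd, hxd⟩
    · simp only [Bool.not_eq_true] at hp
      rw [if_neg (by simp [hp])]
      constructor
      · rintro (hs | ⟨d, hd, hpd, hxd⟩)
        · exact Or.inl hs
        · exact Or.inr ⟨d, by simp [hd], hpd, hxd⟩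
      · rintro (hs | ⟨d, hd, hpd, hxd⟩)
        · exact Or.inl hs
        · rcases List.mem_cons.mp hd with h1 | h1
          · subst h1; simp [hp] at hpd
          · exact Or.inr ⟨d, h1, hpd, hxd⟩

-- membership in the 'unstable' accumulation over a list of (empty-cell) coordinates
theorem pv_mem_dirfold (l : List (Int × Int)) (s : PySem.Set (Int × Int))
    (rows cols : Int) (x : Int × Int) :
    (x ∈ l.foldl (fun s rc =>
        pvDirs.foldl (fun s d =>
          if pvInb rows cols (rc.1 + d.1) (rc.2 + d.2)
          then PySem.Set.add s (rc.1 + d.1, rc.2 + d.2) else s) s) s) ↔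
      x ∈ s ∨ ∃ rc ∈ l, ∃ d ∈ pvDirs,
        pvInb rows cols (rc.1 + d.1) (rc.2 + d.2) = true ∧ x = (rc.1 + d.1, rc.2 + d.2) := by
  induction l generalizing s with
  | nil => simp
  | cons h t ih =>
    simp only [List.foldl_cons, ih,
      pv_mem_addfold pvDirs s (fun d => pvInb rows cols (h.1 + d.1) (h.2 + d.2))
        (fun d => (h.1 + d.1, h.2 + d.2)) x]
    constructor
    · rintro (⟨hs | ⟨d, hd, hp, hx⟩⟩ | ⟨rc, hrc, d, hd, hp, hx⟩)
      · exact Or.inl hs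
      · exact Or.inr ⟨h, by simp, d, hd, hp, hx⟩
      · exact Or.inr ⟨rc, by simp [hrc], d, hd, hp, hx⟩
    · rintro (hs | ⟨rc, hrc, d, hd, hp, hx⟩)
      · exact Or.inl (Or.inl hs)
      · rcases List.mem_cons.mp hrc with h1 | h1
        · subst h1; exact Or.inl (Or.inr ⟨d, hd, hp, hx⟩)
        · exact Or.inr ⟨rc, h1, d, hd, hp, hx⟩

theorem pvDirs_neg : ∀ d ∈ pvDirs, (-d.1, -d.2) ∈ pvDirs := by decide

-- the empty-cell comprehension collects exactly the in-range coordinates holding 0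
theorem pv_mem_empties (board : List (List Int)) (rows cols : Int) (x : Int × Int) :
    (x ∈ (PySem.List.pyRange 0 rows 1).flatMap (fun r =>
        ((PySem.List.pyRange 0 cols 1).filter (fun c => pvAt board r c == 0)).map
          (fun c => (r, c)))) ↔
      (0 ≤ x.1 ∧ x.1 < rows) ∧ (0 ≤ x.2 ∧ x.2 < cols) ∧ pvAt board x.1 x.2 = 0 := by
  rcases x with ⟨r, c⟩
  simp only [List.mem_flatMap, List.mem_map, List.mem_filter, PySem.List.mem_pyRange_one]
  constructor
  · rintro ⟨r', hr', c', ⟨hc', h0⟩, heq⟩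
    injection heq with h1 h2
    subst h1; subst h2
    exact ⟨hr', hc', by simpa using h0⟩
  · rintro ⟨hr, hc, h0⟩
    exact ⟨r, hr, c, ⟨hc, by simpa using h0⟩, rfl⟩

-- the core correspondence: a cell is in the unstable set iff one of its in-bounds
-- neighbors is empty (for an in-bounds cell)
theorem pv_key (board : List (List Int)) (rows cols r c : Int)
    (hr : 0 ≤ r ∧ r < rows) (hc : 0 ≤ c ∧ c < cols) :
    ((r, c) ∈ ((PySem.List.pyRange 0 rows 1).flatMap (fun r =>
        ((PySem.List.pyRange 0 cols 1).filter (fun c => pvAt board r c == 0)).map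
          (fun c => (r, c)))).foldl (fun s rc =>
        pvDirs.foldl (fun s d =>
          if pvInb rows cols (rc.1 + d.1) (rc.2 + d.2)
          then PySem.Set.add s (rc.1 + d.1, rc.2 + d.2) else s) s) PySem.Set.empty) ↔
      ∃ d ∈ pvDirs, pvInb rows cols (r + d.1) (c + d.2) = true ∧
        pvAt board (r + d.1) (c + d.2) = 0 := by
  rw [pv_mem_dirfold]
  simp only [PySem.Set.empty, List.not_mem_nil, false_or]
  constructor
  · rintro ⟨rc, hrc, d, hd, hp, hx⟩
    rw [pv_mem_empties] at hrc
    obtain ⟨hb1, hb2, h0⟩ := hrc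
    have h1 : r = rc.1 + d.1 := congrArg Prod.fst hx
    have h2 : c = rc.2 + d.2 := congrArg Prod.snd hx
    refine ⟨(-d.1, -d.2), pvDirs_neg d hd, ?_, ?_⟩
    · simp only [pvInb]
      have : r + -d.1 = rc.1 := by omega
      have : c + -d.2 = rc.2 := by omega
      simp only [Bool.and_eq_true, decide_eq_true_eq]
      omega
    · have e1 : r + -d.1 = rc.1 := by omega
      have e2 : c + -d.2 = rc.2 := by omega
      rw [e1, e2]; exact h0
  · rintro ⟨d, hd, hp, h0⟩
    simp only [pvInb, Bool.and_eq_true, decide_eq_true_eq] at hp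
    refine ⟨(r + d.1, c + d.2), ?_, (-d.1, -d.2), pvDirs_neg d hd, ?_, ?_⟩
    · rw [pv_mem_empties]; exact ⟨⟨hp.1.1.1, hp.1.1.2⟩, ⟨hp.1.2, hp.2⟩, h0⟩
    · simp only [pvInb, Bool.and_eq_true, decide_eq_true_eq]
      constructor; constructor; constructor
      all_goals omega
    · have e1 : r + d.1 + -d.1 = r := by omega
      have e2 : c + d.2 + -d.2 = c := by omega
      rw [e1, e2]

-- ===== VERDICT (by name: the statement is the Claim_ definition above) =====
theorem find_stable_disks_spec : Claim_equal_find_stable_disks := by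
  intro board player _ _
  unfold Spec_find_stable_disks find_stable_disks find_stable_disks_alt
  dsimp only
  set rows : Int := (board.length : Int) with hrows
  set cols : Int := ((PySem.List.pyGetD board 0 []).length : Int) with hcols
  set U := ((PySem.List.pyRange 0 rows 1).flatMap (fun r =>
      ((PySem.List.pyRange 0 cols 1).filter (fun c => pvAt board r c == 0)).map
        (fun c => (r, c)))).foldl (fun s rc =>
      pvDirs.foldl (fun s d =>
        if pvInb rows cols (rc.1 + d.1) (rc.2 + d.2)
        then PySem.Set.add s (rc.1 + d.1, rc.2 + d.2) else s) s) PySem.Set.empty with hU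
  -- the per-cell conditions of A and B agree on in-range cells
  have hbody : ∀ r c, (0 ≤ r ∧ r < rows) → (0 ≤ c ∧ c < cols) → ∀ a : Int,
      (if pvAt board r c == player then
        if pvDirs.all (fun d =>
          !(pvInb rows cols (r + d.1) (c + d.2) && (pvAt board (r + d.1) (c + d.2) == 0)))
        then a + 1 else a
      else a) =
      (if (pvAt board r c == player && !(PySem.Set.contains U (r, c))) = true
       then a + 1 else a) := by
    intro r c hr hc a
    have hiff := pv_key board rows cols r c hr hc
    have hcontains : PySem.Set.contains U (r, c) = true ↔ (r, c) ∈ U :=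
      PySem.Set.contains_iff U (r, c)
    have hall : (pvDirs.all (fun d =>
        !(pvInb rows cols (r + d.1) (c + d.2) && (pvAt board (r + d.1) (c + d.2) == 0))))
        = !(PySem.Set.contains U (r, c)) := by
      rcases h : PySem.Set.contains U (r, c) with _ | _
      · simp only [Bool.not_false, List.all_eq_true]
        intro d hd
        simp only [Bool.not_eq_true', Bool.and_eq_false_iff]
        by_contra hcon
        simp only [not_or, Bool.not_eq_false] at hcon
        have hmem : (r, c) ∈ U := hiff.mpr ⟨d, hd, hcon.1, by simpa using hcon.2⟩
        have ht := hcontains.mpr hmem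
        rw [h] at ht
        exact Bool.false_ne_true ht
      · simp only [Bool.not_true]
        have hmem : (r, c) ∈ U := hcontains.mp h
        obtain ⟨d, hd, hp, h0⟩ := hiff.mp hmem
        apply List.all_eq_false.mpr
        exact ⟨d, hd, by simp [hp, h0]⟩
    rw [hall]
    rcases h1 : (pvAt board r c == player) with _ | _ <;>
      rcases h2 : PySem.Set.contains U (r, c) with _ | _ <;> simp [*]
  -- A's inner loop is a count of B's per-cell condition over the row
  have hA : ∀ r, (0 ≤ r ∧ r < rows) → ∀ acc : Int,
      List.foldl (fun acc c =>
        if pvAt board r c == player then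
          if pvDirs.all (fun d =>
            !(pvInb rows cols (r + d.1) (c + d.2) && (pvAt board (r + d.1) (c + d.2) == 0)))
          then acc + 1 else acc
        else acc) acc (PySem.List.pyRange 0 cols 1) = acc +
        (((PySem.List.pyRange 0 cols 1).countP (fun c =>
          pvAt board r c == player && !(PySem.Set.contains U (r, c)))) : Int) := by
    intro r hr acc
    have e1 := PySem.List.foldl_congr_mem (PySem.List.pyRange 0 cols 1)
      (fun a c => if pvAt board r c == player then
          if pvDirs.all (fun d =>
            !(pvInb rows cols (r + d.1) (c + d.2) && (pvAt board (r + d.1) (c + d.2) == 0)))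
          then a + 1 else a
        else a)
      (fun a c => if (pvAt board r c == player && !(PySem.Set.contains U (r, c))) = true
        then a + 1 else a)
      acc
      (fun a c hcm => hbody r c hr (PySem.List.mem_pyRange_one.mp hcm) a)
    rw [e1, PySem.List.foldl_if_add_one]
  -- flatten A's nested loop to a sum of per-row counts
  have e2 := PySem.List.foldl_congr_mem (PySem.List.pyRange 0 rows 1)
    (fun acc r => List.foldl (fun acc c =>
        if pvAt board r c == player then
          if pvDirs.all (fun d =>
            !(pvInb rows cols (r + d.1) (c + d.2) && (pvAt board (r + d.1) (c + d.2) == 0)))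
          then acc + 1 else acc
        else acc) acc (PySem.List.pyRange 0 cols 1))
    (fun acc r => acc + (((PySem.List.pyRange 0 cols 1).countP (fun c =>
        pvAt board r c == player && !(PySem.Set.contains U (r, c)))) : Int))
    0
    (fun acc r hrm => hA r (PySem.List.mem_pyRange_one.mp hrm) acc)
  rw [e2, PySem.List.foldl_add (PySem.List.pyRange 0 rows 1) (fun r =>
      (((PySem.List.pyRange 0 cols 1).countP (fun c =>
        pvAt board r c == player && !(PySem.Set.contains U (r, c)))) : Int)) 0]
  -- B's flat count over all pairs is the same sum of per-row counts
  rw [List.countP_flatMap]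
  simp only [zero_add]
  rw [Nat.cast_list_sum, List.map_map]
  congr 1
  apply List.map_congr_left
  intro r _
  simp only [Function.comp_apply]
  rw [List.countP_map]
  rfl
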